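-- pv_equiv track=rewrite | github.com/giliaann/scripting-languages-lab | lab2/reducing/proper_name_ratio.py | has_proper_name
-- ===== SOURCE A (Python) =====
-- def split_first_word(sentence):
--     word = ""
--     remainder = ""
--     i = 0
--     while i < len(sentence):
--         c = sentence[i]
--         if c.isalpha():
--             word += c
--         #ommit first whitespaces
--         elif len(word) != 0:
--             break
--         i += 1
--
--     remainder = sentence[i:]
--
--     return word, remainder
--
-- def has_proper_name(sentence: str) -> bool:
--     _, sentence = split_first_word(sentence)
--     first_word, sentence = split_first_word(sentence)
--
--     while first_word:
--         if first_word[0].isupper():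
--             return True
--         first_word, sentence = split_first_word(sentence)
--     return False
-- ===== SOURCE B (Python) =====
-- def has_proper_name(sentence: str) -> bool:
--     word_count = 0
--     prev_alpha = False
--     for c in sentence:
--         a = c.isalpha()
--         if a and not prev_alpha:
--             word_count += 1
--             if word_count >= 2 and c.isupper():
--                 return True
--         prev_alpha = a
--     return False
-- ===== Notes on version B (the rewrite author's own statement) =====
-- stated objective: faster
-- what changed: B replaces A's repeated split_first_word calls (each rebuilding a word by string concatenation and re-slicing the remainder) with one linear pass over the characters that counts word starts and tests the first letter of every word after the first.
import Mathlib
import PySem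

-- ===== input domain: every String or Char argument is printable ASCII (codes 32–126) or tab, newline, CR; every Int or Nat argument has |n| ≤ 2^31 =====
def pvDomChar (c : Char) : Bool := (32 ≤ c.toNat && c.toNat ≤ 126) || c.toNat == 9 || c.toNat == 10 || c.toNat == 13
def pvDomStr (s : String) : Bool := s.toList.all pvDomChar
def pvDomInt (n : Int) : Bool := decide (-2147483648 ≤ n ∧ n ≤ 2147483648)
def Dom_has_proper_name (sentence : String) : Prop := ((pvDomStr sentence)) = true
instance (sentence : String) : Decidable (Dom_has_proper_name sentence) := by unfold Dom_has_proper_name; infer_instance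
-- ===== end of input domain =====

-- B replaces A's quadratic split-and-reslice word extraction by a single linear scan
-- counting word starts; equivalence of return values is proved on all of Dom (A is total).

-- ===== PORT A =====
-- split_first_word's while loop: accumulate alpha chars into `word`, skip leading
-- non-alpha, break at the first non-alpha after the word; remainder = sentence[i:].
def splitFirstWord (cs : List Char) (word : List Char) : List Char × List Char :=
  match cs with
  | [] => (word, [])
  | c :: rest =>
    if c.isAlpha then splitFirstWord rest (word ++ [c])
    else if word ≠ [] then (word, c :: rest)
    else splitFirstWord rest word

-- termination helper for the while loop of has_proper_name (cited in decreasing_by)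
theorem splitFirstWord_len (cs : List Char) (word : List Char) :
    (splitFirstWord cs word).1.length + (splitFirstWord cs word).2.length
      ≤ word.length + cs.length := by
  induction cs generalizing word with
  | nil => simp [splitFirstWord]
  | cons c rest ih =>
    simp only [splitFirstWord]
    split
    · have := ih (word ++ [c]); simp at this; simpa [List.length_cons] using this.trans (by omega)
    · split
      · simp [List.length_cons]
      · have := ih word; simpa [List.length_cons] using this.trans (by omega)

-- the `while first_word:` loop of has_proper_name
def hpnLoop (firstWord : List Char) (rest : List Char) : Bool :=
  match firstWord with
  | [] => false
  | c :: _ =>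
    if c.isUpper then true
    else
      let p := splitFirstWord rest []
      hpnLoop p.1 p.2
termination_by firstWord.length + rest.length
decreasing_by
  have h := splitFirstWord_len rest []
  simp at h
  simp [List.length_cons]; omega

def has_proper_name (sentence : String) : Bool :=
  let p1 := splitFirstWord sentence.toList []
  let p2 := splitFirstWord p1.2 []
  hpnLoop p2.1 p2.2

-- ===== PORT B =====
-- single pass: word_count / prev_alpha state machine
def altLoop (cs : List Char) (wordCount : Nat) (prevAlpha : Bool) : Bool :=
  match cs with
  | [] => false
  | c :: rest =>
    let a := c.isAlpha
    if a && !prevAlpha then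
      let wc := wordCount + 1
      if 2 ≤ wc ∧ c.isUpper then true
      else altLoop rest wc a
    else altLoop rest wordCount a

def has_proper_name_alt (sentence : String) : Bool :=
  altLoop sentence.toList 0 false

-- ===== PRECONDITION & SPEC =====
def Spec_has_proper_name (sentence : String) (out : Bool) : Prop := out = has_proper_name_alt sentence
instance (sentence : String) (out : Bool) : Decidable (Spec_has_proper_name sentence out) := by unfold Spec_has_proper_name; infer_instance

-- ===== CLAIM (what is proved, stated in full; the proofs are below) =====
def Claim_equal_has_proper_name : Prop := ∀ (sentence : String), Dom_has_proper_name sentence → Spec_has_proper_name sentence (has_proper_name sentence)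

-- ===== LEMMAS AND PROOFS =====

-- characterization of splitFirstWord with nonempty accumulator
theorem sfw_acc (cs : List Char) (w : List Char) (hw : w ≠ []) :
    splitFirstWord cs w = (w ++ cs.takeWhile Char.isAlpha, cs.dropWhile Char.isAlpha) := by
  induction cs generalizing w with
  | nil => simp [splitFirstWord]
  | cons c rest ih =>
    by_cases hc : c.isAlpha
    · rw [splitFirstWord, if_pos hc, ih (w ++ [c]) (by simp)]
      simp [hc]
    · rw [splitFirstWord, if_neg hc, if_pos hw]
      simp [hc]

-- B's loop with prevAlpha = true skips the current alpha run
theorem altLoop_true (cs : List Char) (wc : Nat) :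
    altLoop cs wc true = altLoop (cs.dropWhile Char.isAlpha) wc false := by
  induction cs with
  | nil => simp [altLoop]
  | cons c rest ih =>
    by_cases hc : c.isAlpha
    · rw [altLoop]; simp only [hc, Bool.not_true, Bool.and_false, if_neg Bool.false_ne_true]
      rw [ih, List.dropWhile_cons, if_pos hc]
    · rw [altLoop]; simp only [hc]
      rw [List.dropWhile_cons, if_neg hc, altLoop]
      simp [hc]

-- main loop correspondence: once one word has been counted (wc ≥ 1), B's scan equals
-- A's split-driven loop applied to the first word of the remaining text
theorem altLoop_eq_hpnLoop :
    ∀ n (cs : List Char) (wc : Nat), cs.length ≤ n → 1 ≤ wc →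
      altLoop cs wc false = hpnLoop (splitFirstWord cs []).1 (splitFirstWord cs []).2 := by
  intro n
  induction n with
  | zero =>
    intro cs wc hlen _
    have : cs = [] := List.eq_nil_of_length_eq_zero (by omega)
    subst this; simp [altLoop, splitFirstWord, hpnLoop]
  | succ n ih =>
    intro cs wc hlen hwc
    match cs with
    | [] => simp [altLoop, splitFirstWord, hpnLoop]
    | c :: rest =>
      by_cases hc : c.isAlpha
      · rw [splitFirstWord, if_pos hc]
        simp only [List.nil_append]
        rw [sfw_acc rest [c] (by simp), altLoop]
        simp only [hc, Bool.not_false, Bool.and_true]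
        by_cases hu : c.isUpper
        · simp [hu, hwc, hpnLoop]
        · have h2 : ¬ (2 ≤ wc + 1 ∧ c.isUpper = true) := by simp [hu]
          rw [if_neg h2, altLoop_true,
              ih (rest.dropWhile Char.isAlpha) (wc + 1)
                (by have := List.length_dropWhile_le Char.isAlpha rest
                    simp at hlen ⊢; omega) (by omega)]
          conv_rhs => rw [hpnLoop.eq_def]
          simp [hu]
      · rw [splitFirstWord, if_neg hc]
        simp only [ne_eq, not_true_eq_false]
        rw [altLoop]
        simp only [hc, Bool.false_and, if_neg Bool.false_ne_true]
        exact ih rest wc (by simpa using Nat.le_of_succ_le_succ hlen) hwc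

-- top level: B's scan from the initial state equals A after discarding the first word
theorem altLoop_zero (cs : List Char) :
    altLoop cs 0 false =
      hpnLoop (splitFirstWord (splitFirstWord cs []).2 []).1
              (splitFirstWord (splitFirstWord cs []).2 []).2 := by
  induction cs with
  | nil => simp [altLoop, splitFirstWord, hpnLoop]
  | cons c rest ih =>
    by_cases hc : c.isAlpha
    · rw [splitFirstWord, if_pos hc]
      simp only [List.nil_append]
      rw [sfw_acc rest [c] (by simp), altLoop]
      simp only [hc, Bool.not_false, Bool.and_true]
      have h2 : ¬ (2 ≤ 0 + 1 ∧ c.isUpper = true) := by omega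
      rw [if_neg h2, altLoop_true]
      exact altLoop_eq_hpnLoop (rest.dropWhile Char.isAlpha).length _ 1 le_rfl le_rfl
    · rw [splitFirstWord, if_neg hc]
      simp only [ne_eq, not_true_eq_false]
      rw [altLoop]
      simp only [hc, Bool.false_and, if_neg Bool.false_ne_true]
      exact ih

-- ===== VERDICT (by name: the statement is the Claim_ definition above) =====
theorem has_proper_name_spec : Claim_equal_has_proper_name := by
  intro s _
  unfold Spec_has_proper_name has_proper_name has_proper_name_alt
  exact (altLoop_zero s.toList).symm
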